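-- pv_equiv track=rewrite | github.com/Rellikeht/zadanka | asd/zad3/zad3-kwadrat.py | strong_string
-- ===== SOURCE A (Python) =====
-- def strong_string(T):
--     maxcount = 0
--     for i in range(0, len(T)):
--         c = 1
--         for j in range(i+1, len(T)):
--             if len(T[i]) == len(T[j]):
--                 c += T[i] == T[j] or T[i] == T[j][::-1]
--         if c > maxcount:
--             maxcount = c
--     return maxcount
-- ===== SOURCE B (Python) =====
-- def _key(s):
--     r = s[::-1]
--     return s if s <= r else r
--
-- def strong_string(T):
--     counts = {}
--     for s in T:
--         k = _key(s)
--         counts[k] = counts.get(k, 0) + 1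
--     return max(counts.values(), default=0)
-- ===== Notes on version B (the rewrite author's own statement) =====
-- stated objective: faster
-- what changed: Replaces A's nested pairwise equal-or-reverse scan with one pass that groups strings by the canonical key min(s, s[::-1]) in a dict of counts and returns the maximum count.
import Mathlib
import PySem

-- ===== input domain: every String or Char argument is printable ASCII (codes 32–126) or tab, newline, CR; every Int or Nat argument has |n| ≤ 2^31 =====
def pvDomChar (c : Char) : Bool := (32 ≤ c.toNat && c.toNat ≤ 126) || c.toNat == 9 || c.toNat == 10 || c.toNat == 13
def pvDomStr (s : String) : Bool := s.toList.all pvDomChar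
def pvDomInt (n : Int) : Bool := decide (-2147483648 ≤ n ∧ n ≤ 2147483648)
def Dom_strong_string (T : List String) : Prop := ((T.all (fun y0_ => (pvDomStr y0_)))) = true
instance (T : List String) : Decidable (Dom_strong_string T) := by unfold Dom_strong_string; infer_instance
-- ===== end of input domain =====

-- B replaces A's quadratic pairwise equal-or-reverse scan by a single dict-of-counts pass over
-- canonical keys min(s, s[::-1]); proved to return the same value on every input.

-- s[::-1] (exact: PySem.Str.slice?_none_none_neg_one says s[::-1] is String.ofList s.toList.reverse)
def pvRev (s : String) : String := String.ofList s.toList.reverse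

-- ===== PORT A =====
def strong_string (T : List String) : Int :=
  (PySem.List.pyRange 0 (PySem.List.len T)).foldl (fun maxcount i =>
    let c := (PySem.List.pyRange (i + 1) (PySem.List.len T)).foldl (fun c j =>
      if PySem.Str.len (PySem.List.pyGetD T i "") = PySem.Str.len (PySem.List.pyGetD T j "") then
        c + (if PySem.List.pyGetD T i "" = PySem.List.pyGetD T j ""
               ∨ PySem.List.pyGetD T i "" = pvRev (PySem.List.pyGetD T j "") then 1 else 0)
      else c) 1
    if c > maxcount then c else maxcount) 0

-- ===== PORT B =====
-- port of Source B's _key: r = s[::-1]; s if s <= r else r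
def pvKey (s : String) : String := if s ≤ pvRev s then s else pvRev s

def strong_string_alt (T : List String) : Int :=
  let counts := T.foldl (fun counts s =>
    counts.insert (pvKey s) (counts.getD (pvKey s) 0 + 1)) (PySem.Dict.empty : PySem.Dict String Int)
  PySem.List.maxD counts.values (fun v => v) 0

-- ===== PRECONDITION & SPEC =====
def Spec_strong_string (T : List String) (out : Int) : Prop := out = strong_string_alt T
instance (T : List String) (out : Int) : Decidable (Spec_strong_string T out) := by unfold Spec_strong_string; infer_instance

-- ===== CLAIM (what is proved, stated in full; the proofs are below) =====
def Claim_equal_strong_string : Prop := ∀ (T : List String), Dom_strong_string T → Spec_strong_string T (strong_string T)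

-- ===== LEMMAS AND PROOFS =====

theorem pvRev_rev (s : String) : pvRev (pvRev s) = s := by
  simp [pvRev]

theorem pvRev_len (s : String) : (pvRev s).toList.length = s.toList.length := by
  simp [pvRev]

-- the canonical key identifies exactly the equal-or-reverse relation
theorem pvKey_eq_iff (a b : String) : pvKey a = pvKey b ↔ (a = b ∨ a = pvRev b) := by
  constructor
  · intro h
    unfold pvKey at h
    split_ifs at h with h1 h2 h2
    · exact Or.inl h
    · exact Or.inr h
    · right; rw [← h, pvRev_rev]
    · left
      have := congrArg pvRev h
      rwa [pvRev_rev, pvRev_rev] at this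
  · rintro (rfl | rfl)
    · rfl
    · unfold pvKey
      rw [pvRev_rev]
      split_ifs with h1 h2 h2
      · exact le_antisymm h1 h2
      · rfl
      · rfl
      · rcases le_total b (pvRev b) with h | h
        · exact absurd h h2
        · exact absurd h h1

theorem pvKey_len (a b : String) (h : a = b ∨ a = pvRev b) :
    a.toList.length = b.toList.length := by
  rcases h with rfl | rfl
  · rfl
  · exact pvRev_len b

-- A's inner-loop body counts exactly the key matches
theorem body_eq (a t : String) (c : Int) :
    (if PySem.Str.len a = PySem.Str.len t then
        c + (if a = t ∨ a = pvRev t then 1 else 0)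
      else c)
    = c + (if pvKey t = pvKey a then (1 : Int) else 0) := by
  by_cases hk : pvKey t = pvKey a
  · have h : a = t ∨ a = pvRev t := (pvKey_eq_iff a t).1 hk.symm
    have hl := pvKey_len a t h
    simp [PySem.Str.len_eq, hl, h, hk]
  · have h : ¬(a = t ∨ a = pvRev t) := fun hh => hk (((pvKey_eq_iff a t).2 hh).symm)
    rw [if_neg hk, add_zero]
    split_ifs <;> omega

-- structural form of A's outer loop over the suffixes
def aRec : List String → Int → Int
  | [], m => m
  | t :: rest, m =>
      aRec rest (max m (1 + (rest.countP (fun u => pvKey u == pvKey t) : Int)))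

-- same recursion over the key list
def mRec : List String → Int → Int
  | [], m => m
  | k :: rest, m => mRec rest (max m (1 + (rest.count k : Int)))

theorem outer_eq (T : List String) :
    ∀ (n k : Nat) (m : Int), T.length - k = n →
    (PySem.List.pyRange (k : Int) (PySem.List.len T)).foldl (fun maxcount i =>
      let c := (PySem.List.pyRange (i + 1) (PySem.List.len T)).foldl (fun c j =>
        if PySem.Str.len (PySem.List.pyGetD T i "") = PySem.Str.len (PySem.List.pyGetD T j "") then
          c + (if PySem.List.pyGetD T i "" = PySem.List.pyGetD T j ""
                 ∨ PySem.List.pyGetD T i "" = pvRev (PySem.List.pyGetD T j "") then 1 else 0)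
        else c) 1
      if c > maxcount then c else maxcount) m
    = aRec (T.drop k) m := by
  intro n
  induction n with
  | zero =>
      intro k m hk
      have hle : T.length ≤ k := by omega
      rw [PySem.List.pyRange_one_eq_nil (by simp; exact_mod_cast hle),
        List.drop_eq_nil_of_le hle]
      rfl
  | succ n ih =>
      intro k m hk
      have hklt : k < T.length := by omega
      rw [PySem.List.pyRange_one_cons (by simp; exact_mod_cast hklt)]
      rw [List.foldl_cons]
      have hcast : ((k : Int) + 1) = ((k + 1 : Nat) : Int) := by push_cast; ring
      have hget : PySem.List.pyGetD T (k : Int) "" = T[k] := by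
        rw [PySem.List.pyGetD_natCast, List.getD_eq_getElem T "" hklt]
      -- rewrite the inner fold into a count over the suffix
      have hinner :
          (PySem.List.pyRange ((k : Int) + 1) (PySem.List.len T)).foldl (fun c j =>
            if PySem.Str.len (PySem.List.pyGetD T (k : Int) "") = PySem.Str.len (PySem.List.pyGetD T j "") then
              c + (if PySem.List.pyGetD T (k : Int) "" = PySem.List.pyGetD T j ""
                     ∨ PySem.List.pyGetD T (k : Int) "" = pvRev (PySem.List.pyGetD T j "") then 1 else 0)
            else c) 1
          = 1 + ((T.drop (k + 1)).countP (fun u => pvKey u == pvKey T[k]) : Int) := by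
        rw [PySem.List.foldl_pyRange_pyGetD T ""
          (fun c t =>
            if PySem.Str.len (PySem.List.pyGetD T (k : Int) "") = PySem.Str.len t then
              c + (if PySem.List.pyGetD T (k : Int) "" = t
                     ∨ PySem.List.pyGetD T (k : Int) "" = pvRev t then 1 else 0)
            else c) 1 (by positivity)]
        have htoNat : ((k : Int) + 1).toNat = k + 1 := by omega
        rw [htoNat, hget]
        have hb : ∀ (c : Int) (t : String),
            (if PySem.Str.len T[k] = PySem.Str.len t then
                c + (if T[k] = t ∨ T[k] = pvRev t then 1 else 0)
              else c)
            = c + (if (fun u => pvKey u == pvKey T[k]) t = true then (1 : Int) else 0) := by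
          intro c t
          rw [body_eq]
          simp
        calc (T.drop (k + 1)).foldl (fun c t =>
            if PySem.Str.len T[k] = PySem.Str.len t then
              c + (if T[k] = t ∨ T[k] = pvRev t then 1 else 0)
            else c) 1
            = (T.drop (k + 1)).foldl (fun c t =>
                c + (if (fun u => pvKey u == pvKey T[k]) t = true then (1 : Int) else 0)) 1 := by
              congr 1
              funext c t
              exact hb c t
          _ = 1 + ((T.drop (k + 1)).countP (fun u => pvKey u == pvKey T[k]) : Int) := by
              rw [PySem.List.foldl_add, PySem.List.sum_map_ite_one_zero]
      simp only [hinner]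
      rw [List.drop_eq_getElem_cons hklt]
      show _ = aRec (T[k] :: T.drop (k + 1)) m
      rw [aRec]
      rw [hcast, ih (k + 1) _ (by omega)]
      congr 1
      split_ifs with h <;> omega
  
theorem aRec_eq_mRec : ∀ (T : List String) (m : Int), aRec T m = mRec (T.map pvKey) m := by
  intro T
  induction T with
  | nil => intro m; rfl
  | cons t rest ih =>
      intro m
      rw [List.map_cons, aRec, mRec, ih]
      congr 2
      rw [List.count_eq_countP, List.countP_map]
      rfl

-- max with count lists: the running max over the distinct-key counts
def NB (ks : List String) : Int :=
  ((PySem.Set.ofList ks).map (fun k => (ks.count k : Int))).foldl max 0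

theorem foldl_max_le (l : List Int) : ∀ (init b : Int), init ≤ b → (∀ x ∈ l, x ≤ b) →
    l.foldl max init ≤ b := by
  induction l with
  | nil => intro init b h _; simpa using h
  | cons x t ih =>
      intro init b h hx
      rw [List.foldl_cons]
      exact ih _ _ (max_le h (hx x (List.mem_cons_self))) (fun y hy => hx y (List.mem_cons_of_mem _ hy))

theorem NB_nonneg (ks : List String) : 0 ≤ NB ks :=
  (PySem.List.le_foldl_max _ 0).1

theorem NB_cons (k : String) (rest : List String) :
    NB (k :: rest) = max (1 + (rest.count k : Int)) (NB rest) := by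
  apply le_antisymm
  · apply foldl_max_le
    · exact le_trans (NB_nonneg rest) (le_max_right _ _)
    · intro v hv
      rcases List.mem_map.1 hv with ⟨j, hj, rfl⟩
      have hjmem : j ∈ k :: rest := (PySem.Set.mem_ofList _ _).1 hj
      by_cases hjk : j = k
      · subst hjk
        rw [List.count_cons_self]
        apply le_trans _ (le_max_left _ _)
        push_cast; omega
      · rw [List.count_cons_of_ne (fun hh => hjk hh.symm)]
        apply le_trans _ (le_max_right _ _)
        have hjr : j ∈ rest := by
          rcases List.mem_cons.1 hjmem with h | h
          · exact absurd h hjk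
          · exact h
        exact (PySem.List.le_foldl_max _ 0).2 _
          (List.mem_map.2 ⟨j, (PySem.Set.mem_ofList _ _).2 hjr, rfl⟩)
  · apply max_le
    · have hk : k ∈ PySem.Set.ofList (k :: rest) :=
        (PySem.Set.mem_ofList _ _).2 (List.mem_cons_self)
      have := (PySem.List.le_foldl_max
        ((PySem.Set.ofList (k :: rest)).map (fun j => ((k :: rest).count j : Int))) 0).2
        _ (List.mem_map.2 ⟨k, hk, rfl⟩)
      rw [List.count_cons_self] at this
      unfold NB
      push_cast at this ⊢
      omega
    · apply foldl_max_le
      · exact NB_nonneg _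
      · intro v hv
        rcases List.mem_map.1 hv with ⟨j, hj, rfl⟩
        have hjr : j ∈ rest := (PySem.Set.mem_ofList _ _).1 hj
        have h1 : rest.count j ≤ (k :: rest).count j := by
          by_cases hjk : j = k
          · subst hjk; rw [List.count_cons_self]; omega
          · rw [List.count_cons_of_ne (fun hh => hjk hh.symm)]
        have h2 : ((k :: rest).count j : Int) ≤ NB (k :: rest) :=
          (PySem.List.le_foldl_max _ 0).2 _
            (List.mem_map.2 ⟨j, (PySem.Set.mem_ofList _ _).2 (List.mem_cons_of_mem _ hjr), rfl⟩)
        exact le_trans (by exact_mod_cast h1) h2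

theorem mRec_eq (ks : List String) : ∀ (m : Int), 0 ≤ m → mRec ks m = max m (NB ks) := by
  induction ks with
  | nil =>
      intro m hm
      have : NB ([] : List String) = 0 := rfl
      rw [mRec, this, max_eq_left hm]
  | cons k rest ih =>
      intro m hm
      rw [mRec, ih _ (le_trans (by positivity) (le_max_right m (1 + (rest.count k : Int)))),
        max_assoc, ← NB_cons]

theorem alt_eq (T : List String) :
    strong_string_alt T = NB (T.map pvKey) := by
  show PySem.List.maxD (T.foldl (fun counts s =>
      counts.insert (pvKey s) (counts.getD (pvKey s) 0 + 1))
      (PySem.Dict.empty : PySem.Dict String Int)).values (fun v => v) 0 = NB (T.map pvKey)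
  rw [show (T.foldl (fun counts s =>
        counts.insert (pvKey s) (counts.getD (pvKey s) 0 + 1))
        (PySem.Dict.empty : PySem.Dict String Int))
      = ((T.map pvKey).foldl (fun d x => d.insert x (d.getD x 0 + 1))
          (PySem.Dict.empty : PySem.Dict String Int)) from (List.foldl_map (f := pvKey)
            (g := fun d x => d.insert x (d.getD x 0 + 1)) (l := T)
            (init := (PySem.Dict.empty : PySem.Dict String Int))).symm]
  rw [PySem.Dict.foldl_insert_getD_add_one_eq_counter]
  have hvals : (PySem.Dict.counter (T.map pvKey)).values
      = (PySem.Set.ofList (T.map pvKey)).map (fun k => ((T.map pvKey).count k : Int)) := by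
    unfold PySem.Dict.values
    rw [PySem.Dict.items_counter]
    rw [List.map_map]
    rfl
  rw [hvals]
  -- maxD over the (all ≥ 1) counts is the running max from 0
  rcases hcase : (PySem.Set.ofList (T.map pvKey)).map (fun k => ((T.map pvKey).count k : Int)) with _ | ⟨v, t⟩
  · unfold NB
    rw [hcase]
    rfl
  · have hv1 : (1 : Int) ≤ v := by
      have hv : v ∈ (PySem.Set.ofList (T.map pvKey)).map (fun k => ((T.map pvKey).count k : Int)) := by
        rw [hcase]; exact List.mem_cons_self
      rcases List.mem_map.1 hv with ⟨j, hj, rfl⟩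
      have : j ∈ T.map pvKey := (PySem.Set.mem_ofList _ _).1 hj
      have := List.count_pos_iff.2 this
      omega
    unfold NB PySem.List.maxD
    rw [hcase, PySem.List.max?_id_cons, Option.getD_some, List.foldl_cons,
      max_eq_right (le_trans zero_le_one hv1)]

-- ===== VERDICT (by name: the statement is the Claim_ definition above) =====
theorem strong_string_spec : Claim_equal_strong_string := by
  intro T _
  unfold Spec_strong_string
  have hA : strong_string T = aRec T 0 := by
    unfold strong_string
    have := outer_eq T T.length 0 0 (by omega)
    simpa using this
  rw [hA, aRec_eq_mRec, mRec_eq _ 0 le_rfl, alt_eq,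
    max_eq_right (NB_nonneg _)]
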